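-- pv_equiv track=rewrite | github.com/Vincent-Flotron/BDExpl | QueryManager.py | extract_packaged_routine
-- ===== SOURCE A (Python) =====
-- def extract_packaged_routine(source_lines, routine_name):
--     """
--     Extracts a single FUNCTION or PROCEDURE body from a PACKAGE BODY.
--     Oracle does NOT store this separately.
--     This is how SQL Developer does it internally.
--     """
--     routine_name = routine_name.upper()
--     inside = False
--     buffer = []
--
--     for _, line in source_lines:
--         upper = line.upper()
--
--         if (
--             f"PROCEDURE {routine_name}" in upper
--             or f"FUNCTION {routine_name}" in upper
--         ):
--             inside = True
--
--         if inside: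
--             buffer.append(line)
--             if f"END {routine_name}" in upper:
--                 break
--
--     return "".join(buffer)
-- ===== SOURCE B (Python) =====
-- def extract_packaged_routine(source_lines, routine_name):
--     """Index-based: find the start line, then the end line from there, and join the slice."""
--     name = routine_name.upper()
--     lines = [line for _, line in source_lines]
--     start = None
--     for i, l in enumerate(lines):
--         u = l.upper()
--         if f"PROCEDURE {name}" in u or f"FUNCTION {name}" in u:
--             start = i
--             break
--     if start is None:
--         return ""
--     end = len(lines) - 1
--     for i in range(start, len(lines)):
--         if f"END {name}" in lines[i].upper():
--             end = i
--             break
--     return "".join(lines[start:end + 1])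
-- ===== Notes on version B (the rewrite author's own statement) =====
-- stated objective: simpler
-- what changed: Replaces the running inside-flag state machine with explicit boundary indices: find the start index, find the end index from there (defaulting to the last line), and join the inclusive slice.
import Mathlib
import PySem

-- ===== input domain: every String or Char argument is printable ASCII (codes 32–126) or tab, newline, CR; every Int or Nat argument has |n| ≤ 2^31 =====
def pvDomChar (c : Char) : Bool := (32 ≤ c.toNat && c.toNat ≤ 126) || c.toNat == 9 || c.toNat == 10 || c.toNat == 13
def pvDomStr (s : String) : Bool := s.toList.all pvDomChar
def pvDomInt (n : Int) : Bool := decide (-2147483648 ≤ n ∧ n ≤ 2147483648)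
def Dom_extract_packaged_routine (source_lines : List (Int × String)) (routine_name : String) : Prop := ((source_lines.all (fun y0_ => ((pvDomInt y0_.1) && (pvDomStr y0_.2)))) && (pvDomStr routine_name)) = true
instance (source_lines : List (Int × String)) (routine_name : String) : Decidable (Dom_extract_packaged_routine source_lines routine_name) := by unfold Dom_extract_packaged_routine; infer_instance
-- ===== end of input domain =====

-- B replaces A's running inside-flag state machine by explicit start/end indices and a slice-join (objective: simpler).

-- ===== PORT A =====
-- shared test: f"PROCEDURE {name}" in line.upper() or f"FUNCTION {name}" in line.upper()
def pvStart (name line : String) : Bool :=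
  PySem.Str.isIn ("PROCEDURE " ++ name) (PySem.Str.upper line) ||
  PySem.Str.isIn ("FUNCTION " ++ name) (PySem.Str.upper line)

-- shared test: f"END {name}" in line.upper()
def pvEnd (name line : String) : Bool :=
  PySem.Str.isIn ("END " ++ name) (PySem.Str.upper line)

-- A's for-loop with state (inside, buffer) and break on the END line
def pvALoop (name : String) : List (Int × String) → Bool → List String → List String
  | [], _, buf => buf
  | (_, line) :: rest, inside, buf =>
    let inside' := if pvStart name line then true else inside
    if inside' then
      let buf' := buf ++ [line]
      if pvEnd name line then buf' else pvALoop name rest inside' buf'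
    else pvALoop name rest inside' buf

def extract_packaged_routine (source_lines : List (Int × String)) (routine_name : String) : String :=
  let name := PySem.Str.upper routine_name
  PySem.Str.join "" (pvALoop name source_lines false [])

-- ===== PORT B =====
def extract_packaged_routine_alt (source_lines : List (Int × String)) (routine_name : String) : String :=
  let name := PySem.Str.upper routine_name
  let lines := source_lines.map (·.2)
  match lines.findIdx? (fun l => pvStart name l) with
  | none => ""
  | some start =>
    let stop : Nat :=
      match (lines.drop start).findIdx? (fun l => pvEnd name l) with
      | some j => start + j
      | none => lines.length - 1
    PySem.Str.join "" (PySem.List.slice lines (some (start : Int)) (some ((stop : Int) + 1)))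

-- ===== PRECONDITION & SPEC =====
def Spec_extract_packaged_routine (source_lines : List (Int × String)) (routine_name : String) (out : String) : Prop := out = extract_packaged_routine_alt source_lines routine_name
instance (source_lines : List (Int × String)) (routine_name : String) (out : String) : Decidable (Spec_extract_packaged_routine source_lines routine_name out) := by unfold Spec_extract_packaged_routine; infer_instance

-- ===== CLAIM (what is proved, stated in full; the proofs are below) =====
def Claim_equal_extract_packaged_routine : Prop := ∀ (source_lines : List (Int × String)) (routine_name : String), Dom_extract_packaged_routine source_lines routine_name → Spec_extract_packaged_routine source_lines routine_name (extract_packaged_routine source_lines routine_name)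

-- ===== LEMMAS AND PROOFS =====

-- proof-side model of A's collection phase (inside = true): take through the first END line inclusive
def pvCollect (name : String) : List String → List String
  | [] => []
  | l :: rest => l :: (if pvEnd name l then [] else pvCollect name rest)

-- once inside, A appends lines until (and including) the first END line
theorem pvALoop_inside (name : String) (sl : List (Int × String)) (buf : List String) :
    pvALoop name sl true buf = buf ++ pvCollect name (sl.map (·.2)) := by
  induction sl generalizing buf with
  | nil => simp [pvALoop, pvCollect]
  | cons p rest ih =>
    obtain ⟨k, line⟩ := p
    simp only [pvALoop, List.map_cons, pvCollect]
    by_cases he : pvEnd name line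
    · simp [he]
    · simp [he, ih]

-- before the first start line, A just skips; at it, it switches to the collection phase
theorem pvALoop_outside (name : String) (sl : List (Int × String)) :
    pvALoop name sl false [] =
      match (sl.map (·.2)).findIdx? (fun l => pvStart name l) with
      | none => []
      | some i => pvCollect name ((sl.map (·.2)).drop i) := by
  induction sl with
  | nil => simp [pvALoop]
  | cons p rest ih =>
    obtain ⟨k, line⟩ := p
    by_cases hs : pvStart name line
    · simp only [pvALoop, if_pos, List.map_cons, List.findIdx?_cons, hs]
      by_cases he : pvEnd name line
      · simp [he, pvCollect]
      · simp [he, pvCollect, pvALoop_inside]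
    · simp only [pvALoop, List.map_cons, List.findIdx?_cons]
      simp only [hs, Bool.false_eq_true, if_false, ih]
      cases h : (rest.map (·.2)).findIdx? (fun l => pvStart name l) with
      | none => simp
      | some i => simp

-- the collection phase is a take up to (and including) the first END index
theorem pvCollect_eq (name : String) (ls : List String) :
    pvCollect name ls =
      match ls.findIdx? (fun l => pvEnd name l) with
      | none => ls
      | some j => ls.take (j + 1) := by
  induction ls with
  | nil => simp [pvCollect]
  | cons l rest ih =>
    by_cases he : pvEnd name l
    · simp [pvCollect, he, List.findIdx?_cons]
    · simp only [pvCollect, he, Bool.false_eq_true, if_false, List.findIdx?_cons, ih]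
      cases h : rest.findIdx? (fun l => pvEnd name l) with
      | none => simp
      | some j => simp

theorem extract_packaged_routine_eq_alt (source_lines : List (Int × String)) (routine_name : String) :
    extract_packaged_routine source_lines routine_name = extract_packaged_routine_alt source_lines routine_name := by
  dsimp only [extract_packaged_routine, extract_packaged_routine_alt]
  set name := PySem.Str.upper routine_name with hname
  set lines := source_lines.map (·.2) with hlines
  rw [pvALoop_outside]
  cases hi : lines.findIdx? (fun l => pvStart name l) with
  | none => simp [PySem.Str.join]
  | some i =>
    dsimp only
    have hilt : i < lines.length := by
      have := List.findIdx?_eq_some_iff_findIdx_eq.mp hi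
      omega
    rw [pvCollect_eq]
    cases hj : (lines.drop i).findIdx? (fun l => pvEnd name l) with
    | none =>
      dsimp only
      -- end index defaults to the last line: slice [i, len) = drop i
      have hlen1 : 1 ≤ lines.length := by omega
      have : ((lines.length - 1 : Nat) : Int) + 1 = (lines.length : Int) := by
        push_cast [Nat.cast_sub hlen1]; ring
      simp only [this]
      rw [PySem.List.slice_toNat lines (Int.natCast_nonneg i) (Int.natCast_nonneg _)]
      simp [List.take_of_length_le]
      rfl
    | some j =>
      have : ((i + j : Nat) : Int) + 1 = (((i + j + 1 : Nat)) : Int) := by push_cast; ring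
      rw [this, PySem.List.slice_toNat lines (Int.natCast_nonneg i) (Int.natCast_nonneg _)]
      simp only [Int.toNat_natCast]
      congr 1
      rw [show i + j + 1 - i = j + 1 from by omega]

-- ===== VERDICT (by name: the statement is the Claim_ definition above) =====
theorem extract_packaged_routine_spec : Claim_equal_extract_packaged_routine := by
  intro sl rn _
  unfold Spec_extract_packaged_routine
  exact extract_packaged_routine_eq_alt sl rn
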